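-- pv_equiv track=rewrite | github.com/chh4031/Python_Study | 코딩테스트/Coding_Test_EX152.py | solution
-- ===== SOURCE A (Python) =====
-- def solution(num_list):
--     controller = 0
--     even = 0
--     odd = 0
--     for i in num_list:
--         if controller == 0:
--             odd += i
--             controller = 1
--         else:
--             even += i
--             controller = 0
--     if even > odd:
--         return even
--     elif odd > even:
--         return odd
--     else:
--         return even
-- ===== SOURCE B (Python) =====
-- def solution(num_list):
--     a = sum(num_list[0::2])
--     b = sum(num_list[1::2])
--     return max(a, b)
-- ===== Notes on version B (the rewrite author's own statement) =====
-- stated objective: simpler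
-- what changed: Replaces the single interleaved loop with a controller toggle and a three-way comparison by two strided slice sums and max.
import Mathlib
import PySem

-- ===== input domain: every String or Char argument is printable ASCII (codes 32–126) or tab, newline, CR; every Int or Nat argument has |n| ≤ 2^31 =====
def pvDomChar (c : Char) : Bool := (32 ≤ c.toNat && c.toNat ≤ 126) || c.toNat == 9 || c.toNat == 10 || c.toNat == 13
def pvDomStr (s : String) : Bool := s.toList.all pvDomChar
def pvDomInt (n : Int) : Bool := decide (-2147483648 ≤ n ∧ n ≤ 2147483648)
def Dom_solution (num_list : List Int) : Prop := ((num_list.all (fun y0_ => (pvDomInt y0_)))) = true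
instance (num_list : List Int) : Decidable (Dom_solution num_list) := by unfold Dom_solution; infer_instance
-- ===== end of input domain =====

-- B replaces A's controller-toggle loop and three-way comparison by two strided slice sums and max (simpler).


-- ===== PORT A =====
-- loop state: (controller, even, odd), exactly A's three variables
def solutionStep (st : Int × Int × Int) (i : Int) : Int × Int × Int :=
  if st.1 = 0 then (1, st.2.1, st.2.2 + i) else (0, st.2.1 + i, st.2.2)

def solution (num_list : List Int) : Int :=
  let st := num_list.foldl solutionStep (0, 0, 0)
  let even := st.2.1
  let odd := st.2.2
  if even > odd then even else if odd > even then odd else even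

-- ===== PORT B =====
-- hand-port of the step-2 slice xs[0::2] (PySem.List.slice has no step); exact for step 2 from the start
def stride2 : List Int → List Int
  | [] => []
  | [x] => [x]
  | x :: _ :: xs => x :: stride2 xs

def solution_alt (num_list : List Int) : Int :=
  let a := (stride2 num_list).sum                 -- sum(num_list[0::2])
  let b := (stride2 num_list.tail).sum            -- sum(num_list[1::2])
  max a b

-- ===== PRECONDITION & SPEC =====
def Spec_solution (num_list : List Int) (out : Int) : Prop := out = solution_alt num_list
instance (num_list : List Int) (out : Int) : Decidable (Spec_solution num_list out) := by unfold Spec_solution; infer_instance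

-- ===== CLAIM (what is proved, stated in full; the proofs are below) =====
def Claim_equal_solution : Prop := ∀ (num_list : List Int), Dom_solution num_list → Spec_solution num_list (solution num_list)

-- ===== LEMMAS AND PROOFS =====
theorem stride2_cons (a : Int) (l : List Int) : stride2 (a :: l) = a :: stride2 l.tail := by
  cases l <;> simp [stride2]

theorem solution_loop : ∀ (xs : List Int) (e o : Int),
    xs.foldl solutionStep (0, e, o)
      = ((if xs.length % 2 = 0 then (0 : Int) else 1),
         e + (stride2 xs.tail).sum, o + (stride2 xs).sum)
  | [], e, o => by simp [stride2]
  | [x], e, o => by simp [solutionStep, stride2]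
  | x :: y :: xs, e, o => by
    have h := solution_loop xs (e + y) (o + x)
    simp only [List.foldl, solutionStep] at h ⊢
    norm_num at h ⊢
    rw [h]
    have hp : (xs.length + 1 + 1) % 2 = xs.length % 2 := by omega
    rw [stride2_cons y xs, show stride2 (x :: y :: xs) = x :: stride2 xs from rfl]
    simp only [hp]
    simp only [Prod.mk.injEq, List.sum_cons]
    exact ⟨trivial, by ring, by ring⟩

theorem solution_spec' (xs : List Int) : solution xs = solution_alt xs := by
  simp only [solution, solution_alt]
  rw [solution_loop xs 0 0]
  simp only [zero_add]
  split_ifs <;> omega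

-- ===== VERDICT (by name: the statement is the Claim_ definition above) =====
theorem solution_spec : Claim_equal_solution := by
  intro xs _
  unfold Spec_solution
  exact solution_spec' xs
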